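-- pv_equiv track=rewrite | github.com/hghyhghy/Codechef-Coding-Ninja | Desktop/DSA/T8/5.py | largest_odd_number_from_string
-- ===== SOURCE A (Python) =====
-- def largest_odd_number_from_string(string):
--
--     number=[]
--     store=""
--
--     for char in string:
--
--         if char.isdigit():
--
--             store += char
--
--         else:
--
--             if store:
--
--                 number.append(int(store))
--                 store =""
--
--
--     if store:
--
--         number.append(int(store))
--
--     odd_number=[num for num in number if num%2 != 0]
--
--     if odd_number:
--
--         return max(odd_number)
--
--     else:
--
--         return None
-- ===== SOURCE B (Python) =====
-- import re
--
-- def largest_odd_number_from_string(string):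
--     odds = [n for n in map(int, re.findall(r'\d+', string)) if n % 2 != 0]
--     return max(odds) if odds else None
-- ===== Notes on version B (the rewrite author's own statement) =====
-- stated objective: idiomatic
-- what changed: Replaces the manual per-char accumulate/flush tokenizer (store buffer + end-of-string flush) with regex extraction of digit runs via re.findall (C-level scanning), then a single comprehension and max.
import Mathlib
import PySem

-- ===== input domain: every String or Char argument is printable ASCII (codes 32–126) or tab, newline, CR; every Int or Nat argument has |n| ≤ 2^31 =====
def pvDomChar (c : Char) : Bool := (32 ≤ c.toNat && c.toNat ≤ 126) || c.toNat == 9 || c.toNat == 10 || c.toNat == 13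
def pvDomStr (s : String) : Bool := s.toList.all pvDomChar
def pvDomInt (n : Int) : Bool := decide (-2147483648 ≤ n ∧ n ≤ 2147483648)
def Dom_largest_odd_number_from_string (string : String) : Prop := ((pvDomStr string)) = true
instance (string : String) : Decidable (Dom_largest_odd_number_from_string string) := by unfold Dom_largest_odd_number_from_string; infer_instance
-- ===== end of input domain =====

-- B replaces A's per-char accumulate/flush tokenizer with regex-style digit-run extraction (re.findall), same cost (objective: idiomatic).


-- ===== PORT A =====
-- int(s) for the only shape both programs call it with: a nonempty all-digit token (exact there: no sign/whitespace/underscore can occur)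
def pvIntOfDigits (cs : List Char) : Int :=
  cs.foldl (fun a c => a * 10 + ((c.toNat : Int) - 48)) 0

-- loop body of A: state is (number, store)
def pvStepA (st : List Int × List Char) (c : Char) : List Int × List Char :=
  if PySem.Chars.isdigit c then (st.1, st.2 ++ [c])
  else if st.2 ≠ [] then (st.1 ++ [pvIntOfDigits st.2], []) else st

-- A's trailing "if store: number.append(int(store))"
def pvFinishA (st : List Int × List Char) : List Int :=
  if st.2 ≠ [] then st.1 ++ [pvIntOfDigits st.2] else st.1

def largest_odd_number_from_string (string : String) : Option Int :=
  let number := pvFinishA (string.toList.foldl pvStepA ([], []))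
  let odd_number := number.filter (fun num => PySem.Int.mod num 2 != 0)
  PySem.List.max? odd_number (fun x => x)

-- ===== PORT B =====
-- re.findall(r'\d+', s): the maximal digit runs of s, left to right
def pvDigitRuns (cs : List Char) : List (List Char) :=
  match cs with
  | [] => []
  | c :: rest =>
    if PySem.Chars.isdigit c then
      (c :: rest.takeWhile PySem.Chars.isdigit) :: pvDigitRuns (rest.dropWhile PySem.Chars.isdigit)
    else pvDigitRuns rest
termination_by cs.length
decreasing_by
  · simpa using Nat.lt_succ_of_le (rest.length_dropWhile_le _)
  · simp

def largest_odd_number_from_string_alt (string : String) : Option Int :=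
  let odds := ((pvDigitRuns string.toList).map pvIntOfDigits).filter (fun n => PySem.Int.mod n 2 != 0)
  PySem.List.max? odds (fun x => x)

-- ===== PRECONDITION & SPEC =====
def Spec_largest_odd_number_from_string (string : String) (out : Option Int) : Prop := out = largest_odd_number_from_string_alt string
instance (string : String) (out : Option Int) : Decidable (Spec_largest_odd_number_from_string string out) := by unfold Spec_largest_odd_number_from_string; infer_instance

-- ===== CLAIM (what is proved, stated in full; the proofs are below) =====
def Claim_equal_largest_odd_number_from_string : Prop := ∀ (string : String), Dom_largest_odd_number_from_string string → Spec_largest_odd_number_from_string string (largest_odd_number_from_string string)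

-- ===== LEMMAS AND PROOFS =====

theorem pvFoldA_acc (cs : List Char) : ∀ (acc : List Int) (store : List Char),
    pvFinishA (cs.foldl pvStepA (acc, store)) = acc ++ pvFinishA (cs.foldl pvStepA ([], store)) := by
  induction cs with
  | nil =>
    intro acc store
    by_cases h : store = [] <;> simp [pvFinishA, h]
  | cons c rest ih =>
    intro acc store
    by_cases hd : PySem.Chars.isdigit c = true
    · simp only [List.foldl_cons, pvStepA, hd, if_true]
      exact ih acc _
    · by_cases hs : store = []
      · subst hs
        simp only [List.foldl_cons, pvStepA, hd, Bool.false_eq_true, if_false, ne_eq,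
          not_true_eq_false, ite_false, not_false_eq_true]
        exact ih acc []
      · simp only [List.foldl_cons, pvStepA, hd, Bool.false_eq_true, if_false, ne_eq, hs,
          not_false_eq_true, if_true]
        rw [ih (acc ++ [pvIntOfDigits store]) []]
        rw [show ([] ++ [pvIntOfDigits store] : List Int) = [pvIntOfDigits store] from rfl, ih [pvIntOfDigits store] []]
        simp

theorem pvFoldA_runs : ∀ (n : Nat) (cs : List Char), cs.length ≤ n → ∀ (store : List Char),
    pvFinishA (cs.foldl pvStepA ([], store)) =
      (if store = [] then pvDigitRuns cs
       else (store ++ cs.takeWhile PySem.Chars.isdigit) :: pvDigitRuns (cs.dropWhile PySem.Chars.isdigit)).map pvIntOfDigits := by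
  intro n
  induction n with
  | zero =>
    intro cs h store
    have hc : cs = [] := List.eq_nil_of_length_eq_zero (Nat.le_zero.mp h)
    subst hc
    by_cases hs : store = [] <;> simp [pvFinishA, pvDigitRuns, hs]
  | succ n ih =>
    intro cs h store
    cases cs with
    | nil => by_cases hs : store = [] <;> simp [pvFinishA, pvDigitRuns, hs]
    | cons c rest =>
      by_cases hd : PySem.Chars.isdigit c = true
      · have step : (c :: rest).foldl pvStepA ([], store) = rest.foldl pvStepA ([], store ++ [c]) := by
          simp [pvStepA, hd]
        rw [step, ih rest (by simpa using Nat.lt_succ_iff.mp (Nat.lt_of_lt_of_le (by simp) h)) (store ++ [c])]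
        have hne : store ++ [c] ≠ [] := by simp
        rw [if_neg hne]
        by_cases hs : store = []
        · subst hs
          rw [if_pos rfl]
          simp [pvDigitRuns, hd]
        · rw [if_neg hs]
          simp [List.takeWhile_cons_of_pos hd, List.dropWhile_cons_of_pos hd]
      · have hrest : rest.length ≤ n := by simpa using Nat.lt_succ_iff.mp (Nat.lt_of_lt_of_le (by simp) h)
        have hruns : pvDigitRuns (c :: rest) = pvDigitRuns rest := by
          simp [pvDigitRuns, hd]
        by_cases hs : store = []
        · subst hs
          have step : (c :: rest).foldl pvStepA ([], ([] : List Char)) = rest.foldl pvStepA ([], []) := by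
            simp [pvStepA, hd]
          rw [step, ih rest hrest [], if_pos rfl, if_pos rfl, hruns]
        · have step : (c :: rest).foldl pvStepA ([], store) = rest.foldl pvStepA ([pvIntOfDigits store], []) := by
            simp [pvStepA, hd, hs]
          have hdf : PySem.Chars.isdigit c = false := by simpa using hd
          rw [step, if_neg hs, pvFoldA_acc, ih rest hrest [], if_pos rfl]
          simp [List.takeWhile_cons, List.dropWhile_cons, hdf, hruns]

-- ===== VERDICT (by name: the statement is the Claim_ definition above) =====
theorem largest_odd_number_from_string_spec : Claim_equal_largest_odd_number_from_string := by
  intro s _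
  unfold Spec_largest_odd_number_from_string largest_odd_number_from_string largest_odd_number_from_string_alt
  rw [pvFoldA_runs s.toList.length s.toList (le_refl _) [], if_pos rfl]
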